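-- pv_equiv track=rewrite | github.com/CrowdingFaun624/Advent-of-Code-2023 | Day 12/Day12.py | is_valid_condition
-- ===== SOURCE A (Python) =====
-- UNKNOWN = 0
--
-- DAMAGED = 1
--
-- OPERATIONAL = 2
--
-- def is_valid_condition(conditions:list[int], sizes:list[int]) -> bool:
--     '''Returns False if the conditions are not valid, and True if they are or it is uncertain.'''
--     length = 0
--     this_sizes:list[int] = []
--     has_unknown = False
--     ends_in_ambiguous_group = False
--     for condition in conditions:
--         if condition is DAMAGED:
--             length += 1
--         elif condition is OPERATIONAL:
--             if length > 0:
--                 this_sizes.append(length)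
--             length = 0
--         elif condition is UNKNOWN:
--             has_unknown = True
--             break
--     else:
--         if not has_unknown and length > 0: # If it does have unknown that means that it must stop with "#?" and the ending group can have any length.
--             this_sizes.append(length)
--             ends_in_ambiguous_group = True
--
--     if this_sizes == sizes:
--         return True # it is complete
--     if has_unknown:
--         if len(this_sizes) > len(sizes):
--             return False # too many groups
--         if ends_in_ambiguous_group:
--             if any(this_size != group_size for this_size, group_size in zip(this_sizes[:-1], sizes[:len(this_sizes)-1])):
--                 return False # wrong group sizes
--             else:
--                 return True # reached an unknown
--         else:
--             if any(this_size != group_size for this_size, group_size in zip(this_sizes, sizes[:len(this_sizes)])):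
--                 return False # wrong group sizes
--             else:
--                 return True # reached an unknown
--     else:
--         if len(this_sizes) != len(sizes):
--             return False # too many or not enough groups
--         elif any(this_size != group_size for this_size, group_size in zip(this_sizes, sizes)):
--             return False # wrong group sizes
--         else:
--             return True # it is complete
-- ===== SOURCE B (Python) =====
-- UNKNOWN = 0
--
-- DAMAGED = 1
--
-- OPERATIONAL = 2
--
-- def is_valid_condition(conditions: list, sizes: list) -> bool:
--     '''Returns False if the conditions are not valid, and True if they are or it is uncertain.'''
--     # Render the conditions as a spring string ('' skips stray values, as A does),
--     # then judge it with string partition/split instead of an accumulator loop.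
--     s = ''.join('?#.'[c] if 0 <= c <= 2 else '' for c in conditions)
--     before, sep, _ = s.partition('?')
--     groups = [len(run) for run in before.split('.') if run]
--     if sep == '?':
--         if before.endswith('#'):
--             groups.pop()  # the group touching the '?' may still grow: any length fits
--         return groups == sizes[:len(groups)]
--     return groups == sizes
-- ===== Notes on version B (the rewrite author's own statement) =====
-- stated objective: simpler
-- what changed: Replaces A's length/accumulator state machine with break/for-else and three zip-compare branches by rendering the conditions as a spring string, partitioning at the first '?', reading the group sizes off a '.'-split, and comparing with sizes (or its prefix) directly.
import Mathlib
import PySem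

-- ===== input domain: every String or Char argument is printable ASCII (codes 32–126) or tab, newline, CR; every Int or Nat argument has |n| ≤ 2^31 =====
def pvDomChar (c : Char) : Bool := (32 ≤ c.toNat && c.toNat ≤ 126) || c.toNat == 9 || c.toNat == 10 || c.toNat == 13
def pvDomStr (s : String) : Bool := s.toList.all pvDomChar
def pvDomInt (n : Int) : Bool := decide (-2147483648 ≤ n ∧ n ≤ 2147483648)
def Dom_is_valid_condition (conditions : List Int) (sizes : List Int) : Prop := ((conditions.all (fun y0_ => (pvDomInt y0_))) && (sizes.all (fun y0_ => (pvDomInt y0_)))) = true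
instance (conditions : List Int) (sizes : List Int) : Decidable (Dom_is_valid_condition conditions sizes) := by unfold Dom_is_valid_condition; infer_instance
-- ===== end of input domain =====

-- B replaces A's accumulator loop by rendering the springs as a string and judging it
-- with partition/split (objective: simpler); return values agree everywhere.

-- ===== PORT A =====
-- A's for-loop with its break/else: state (length, this_sizes); third component = broke on UNKNOWN.
def avcLoop : List Int → Int → List Int → Int × List Int × Bool
  | [], length, acc => (length, acc, false)
  | c :: rest, length, acc =>
    if c == 1 then avcLoop rest (length + 1) acc          -- condition is DAMAGED
    else if c == 2 then                                   -- condition is OPERATIONAL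
      avcLoop rest 0 (if length > 0 then acc ++ [length] else acc)
    else if c == 0 then (length, acc, true)               -- condition is UNKNOWN: break
    else avcLoop rest length acc                          -- stray values: no branch fires

def is_valid_condition (conditions : List Int) (sizes : List Int) : Bool :=
  let r := avcLoop conditions 0 []
  let length := r.1
  let has_unknown := r.2.2
  -- for/else clause (runs only without break): has_unknown is False there
  let this_sizes := if !has_unknown && length > 0 then r.2.1 ++ [length] else r.2.1
  let ends_in_ambiguous_group := !has_unknown && length > 0
  if this_sizes == sizes then true
  else if has_unknown then
    if this_sizes.length > sizes.length then false
    else if ends_in_ambiguous_group then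
      if ((PySem.List.slice this_sizes none (some (-1))).zip
            (PySem.List.slice sizes none (some ((this_sizes.length : Int) - 1)))).any
           (fun p => !(p.1 == p.2)) then false
      else true
    else
      if (this_sizes.zip (PySem.List.slice sizes none (some (this_sizes.length : Int)))).any
           (fun p => !(p.1 == p.2)) then false
      else true
  else
    if !(this_sizes.length == sizes.length) then false
    else if (this_sizes.zip sizes).any (fun p => !(p.1 == p.2)) then false
    else true

-- ===== PORT B =====
-- ''.join('?#.'[c] if 0 <= c <= 2 else '' for c in conditions)
def renderSprings (conditions : List Int) : List Char :=
  conditions.flatMap (fun c =>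
    if c == 0 then ['?'] else if c == 1 then ['#'] else if c == 2 then ['.'] else [])

def is_valid_condition_alt (conditions : List Int) (sizes : List Int) : Bool :=
  let s := renderSprings conditions
  -- before, sep, _ = s.partition('?'); sep == '?'  ⇔  a '?' occurs
  let before := s.takeWhile (fun ch => !(ch == '?'))
  let hasQ := s.any (fun ch => ch == '?')
  -- [len(run) for run in before.split('.') if run]
  let groups : List Int :=
    ((List.splitOn '.' before).filter (fun run => !run.isEmpty)).map (fun run => (run.length : Int))
  if hasQ then
    let groups := if before.getLast? == some '#' then groups.dropLast else groups
    groups == sizes.take groups.length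
  else
    groups == sizes

-- ===== PRECONDITION & SPEC =====
def Spec_is_valid_condition (conditions : List Int) (sizes : List Int) (out : Bool) : Prop := out = is_valid_condition_alt conditions sizes
instance (conditions : List Int) (sizes : List Int) (out : Bool) : Decidable (Spec_is_valid_condition conditions sizes out) := by unfold Spec_is_valid_condition; infer_instance

-- ===== CLAIM (what is proved, stated in full; the proofs are below) =====
def Claim_equal_is_valid_condition : Prop := ∀ (conditions : List Int) (sizes : List Int), Dom_is_valid_condition conditions sizes → Spec_is_valid_condition conditions sizes (is_valid_condition conditions sizes)

-- ===== LEMMAS AND PROOFS =====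

-- pending group length at the end of the (pre-break) scan, and the completed groups
def pendN : List Int → Nat → Nat
  | [], p => p
  | c :: r, p => if c == 1 then pendN r (p + 1) else if c == 2 then pendN r 0 else pendN r p

def grpsN : List Int → Nat → List Int
  | [], _ => []
  | c :: r, p =>
    if c == 1 then grpsN r (p + 1)
    else if c == 2 then (if 0 < p then [(p : Int)] else []) ++ grpsN r 0
    else grpsN r p

def charGroups (b : List Char) : List Int :=
  ((List.splitOn '.' b).filter (fun run => !run.isEmpty)).map (fun run => (run.length : Int))

theorem avcLoop_eq (cs : List Int) : ∀ (p : Nat) (acc : List Int),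
    avcLoop cs (p : Int) acc =
      ((pendN (cs.takeWhile (fun c => !(c == 0))) p : Int),
       acc ++ grpsN (cs.takeWhile (fun c => !(c == 0))) p,
       cs.any (fun c => c == 0)) := by
  induction cs with
  | nil => intro p acc; simp [avcLoop, pendN, grpsN]
  | cons c r ih =>
    intro p acc
    by_cases h1 : c = 1
    · subst h1
      rw [show avcLoop (1 :: r) (p : Int) acc = avcLoop r ((p : Int) + 1) acc from by
        simp [avcLoop]]
      rw [show ((p : Int) + 1) = ((p + 1 : Nat) : Int) from by push_cast; ring, ih (p + 1) acc]
      simp [pendN, grpsN, List.takeWhile_cons]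
    · by_cases h2 : c = 2
      · subst h2
        have ih0 := ih 0
        simp only [Nat.cast_zero] at ih0
        rw [show avcLoop (2 :: r) (p : Int) acc
            = avcLoop r 0 (if (p : Int) > 0 then acc ++ [(p : Int)] else acc) from by
          simp [avcLoop]]
        by_cases hp0 : 0 < p
        · rw [if_pos (by exact_mod_cast hp0), ih0]
          simp [pendN, grpsN, List.takeWhile_cons, hp0]
        · rw [if_neg (by exact_mod_cast hp0), ih0]
          simp [pendN, grpsN, List.takeWhile_cons, hp0]
      · by_cases h0 : c = 0
        · subst h0; simp [avcLoop, pendN, grpsN, List.takeWhile_cons]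
        · rw [show avcLoop (c :: r) (p : Int) acc = avcLoop r (p : Int) acc from by
            simp [avcLoop, h0, h1, h2]]
          rw [ih p acc]
          simp [pendN, grpsN, List.takeWhile_cons, h0, h1, h2]

theorem render_cons (c : Int) (r : List Int) :
    renderSprings (c :: r)
      = (if c == 0 then ['?'] else if c == 1 then ['#'] else if c == 2 then ['.'] else [])
        ++ renderSprings r := by
  simp [renderSprings]

theorem render_takeWhile (cs : List Int) :
    (renderSprings cs).takeWhile (fun ch => !(ch == '?'))
      = renderSprings (cs.takeWhile (fun c => !(c == 0))) := by
  induction cs with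
  | nil => simp [renderSprings]
  | cons c r ih =>
    by_cases h0 : c = 0
    · subst h0
      rw [render_cons]
      simp [List.takeWhile_cons, renderSprings]
    · by_cases h1 : c = 1
      · subst h1
        rw [render_cons]
        simp only [List.takeWhile_cons, show ((1:Int) == 0) = false from rfl]
        simp only [List.singleton_append, List.takeWhile_cons,
          show ('#' == '?') = false from rfl, Bool.not_false, if_true, render_cons]
        simp [ih]
      · by_cases h2 : c = 2
        · subst h2
          rw [render_cons]
          simp only [List.takeWhile_cons, show ((2:Int) == 0) = false from rfl,
            show ((2:Int) == 1) = false from rfl]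
          simp only [List.singleton_append, List.takeWhile_cons,
            show ('.' == '?') = false from rfl, Bool.not_false, if_true, render_cons]
          simp [ih]
        · rw [render_cons]
          simp only [List.takeWhile_cons, h0, h1, h2]
          simp [h0, h1, h2, ih, render_cons]

theorem render_any (cs : List Int) :
    (renderSprings cs).any (fun ch => ch == '?') = cs.any (fun c => c == 0) := by
  induction cs with
  | nil => simp [renderSprings]
  | cons c r ih =>
    rw [render_cons]
    by_cases h0 : c = 0
    · subst h0; simp
    · by_cases h1 : c = 1
      · subst h1; simp [ih]
      · by_cases h2 : c = 2
        · subst h2; simp [ih]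
        · simp [h0, h1, h2, ih]

theorem splitOnP_append_sep {α : Type} (p : α → Bool) (a : α) (xs ys : List α)
    (hxs : ∀ x ∈ xs, ¬ p x) (ha : p a) :
    (xs ++ a :: ys).splitOnP p = xs :: ys.splitOnP p := by
  induction xs with
  | nil => simp [List.splitOnP_cons, ha]
  | cons x xs ih =>
    have hx : ¬ p x := hxs x (by simp)
    have htl : ∀ y ∈ xs, ¬ p y := fun y hy => hxs y (by simp [hy])
    simp [List.splitOnP_cons, hx, ih htl]

theorem splitOn_hash (n : Nat) :
    List.splitOn '.' (List.replicate n '#') = [List.replicate n '#'] := by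
  unfold List.splitOn
  exact List.splitOnP_eq_single _ _ (by intro x hx; simp [List.eq_of_mem_replicate hx])

theorem charGroups_hash (n : Nat) :
    charGroups (List.replicate n '#') = if 0 < n then [(n : Int)] else [] := by
  cases n with
  | zero => simp [charGroups]
  | succ m => simp [charGroups, splitOn_hash]

theorem charGroups_eq (pre : List Int) : ∀ (p : Nat), (∀ c ∈ pre, c ≠ 0) →
    charGroups (List.replicate p '#' ++ renderSprings pre)
      = grpsN pre p ++ (if 0 < pendN pre p then [((pendN pre p : Nat) : Int)] else []) := by
  induction pre with
  | nil => intro p _; simp [renderSprings, charGroups_hash, pendN, grpsN]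
  | cons c r ih =>
    intro p hne
    have hr : ∀ x ∈ r, x ≠ 0 := fun x hx => hne x (by simp [hx])
    by_cases h1 : c = 1
    · subst h1
      have : List.replicate p '#' ++ renderSprings (1 :: r)
          = List.replicate (p + 1) '#' ++ renderSprings r := by
        simp [renderSprings, List.replicate_succ' (n := p)]
      rw [this, ih (p + 1) hr]; simp [pendN, grpsN]
    · by_cases h2 : c = 2
      · subst h2
        have hsp : charGroups (List.replicate p '#' ++ renderSprings (2 :: r))
            = (if 0 < p then [(p : Int)] else []) ++ charGroups (renderSprings r) := by
          have : List.replicate p '#' ++ renderSprings (2 :: r)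
              = List.replicate p '#' ++ '.' :: renderSprings r := by simp [renderSprings]
          rw [this]
          unfold charGroups List.splitOn
          rw [splitOnP_append_sep _ _ _ _
            (by intro x hx; simp [List.eq_of_mem_replicate hx]) (by simp)]
          cases p with
          | zero => simp
          | succ m => simp
        have := ih 0 hr
        simp only [List.replicate_zero, List.nil_append] at this
        rw [hsp, this]; simp [pendN, grpsN]
      · have h0 : c ≠ 0 := hne c (by simp)
        have : List.replicate p '#' ++ renderSprings (c :: r)
            = List.replicate p '#' ++ renderSprings r := by simp [renderSprings, h0, h1, h2]
        rw [this, ih p hr]; simp [pendN, grpsN, h0, h1, h2]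

theorem render_nil_pend (r : List Int) : ∀ p, renderSprings r = [] → pendN r p = p := by
  induction r with
  | nil => intro p _; simp [pendN]
  | cons c s ih =>
    intro p h
    by_cases h0 : c = 0
    · subst h0; simp [renderSprings] at h
    · by_cases h1 : c = 1
      · subst h1; simp [renderSprings] at h
      · by_cases h2 : c = 2
        · subst h2; simp [renderSprings] at h
        · rw [show renderSprings (c :: s) = renderSprings s from by
            simp [renderSprings, h0, h1, h2]] at h
          simp [pendN, h0, h1, h2, ih p h]

theorem getLast_hash (pre : List Int) : ∀ (p : Nat), (∀ c ∈ pre, c ≠ 0) →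
    (((List.replicate p '#' ++ renderSprings pre).getLast? == some '#') = true
      ↔ 0 < pendN pre p) := by
  induction pre with
  | nil =>
    intro p _
    cases p with
    | zero => simp [renderSprings, pendN]
    | succ m =>
      simp only [renderSprings, List.flatMap_nil, List.append_nil, pendN]
      rw [List.replicate_succ', List.getLast?_concat]
      simp
  | cons c r ih =>
    intro p hne
    have hr : ∀ x ∈ r, x ≠ 0 := fun x hx => hne x (by simp [hx])
    by_cases h1 : c = 1
    · subst h1
      have : List.replicate p '#' ++ renderSprings (1 :: r)
          = List.replicate (p + 1) '#' ++ renderSprings r := by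
        simp [renderSprings, List.replicate_succ' (n := p)]
      rw [this]; simpa [pendN] using ih (p + 1) hr
    · by_cases h2 : c = 2
      · subst h2
        have heq : List.replicate p '#' ++ renderSprings (2 :: r)
            = (List.replicate p '#' ++ ['.']) ++ renderSprings r := by simp [renderSprings]
        rw [heq]
        by_cases hnil : renderSprings r = []
        · rw [hnil]
          simp only [List.append_nil, List.getLast?_concat, pendN]
          simp [render_nil_pend r 0 hnil]
        · rw [List.getLast?_append_of_ne_nil _ hnil]
          have := ih 0 hr
          simp only [List.replicate_zero, List.nil_append] at this
          simpa [pendN] using this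
      · have h0 : c ≠ 0 := hne c (by simp)
        have : List.replicate p '#' ++ renderSprings (c :: r)
            = List.replicate p '#' ++ renderSprings r := by simp [renderSprings, h0, h1, h2]
        rw [this]; simp only [pendN, h0, h1, h2, if_false]
        simpa [h1, h2] using ih p hr

theorem eq_iff_len_zip (a : List Int) : ∀ b : List Int,
    (a = b) ↔ (a.length = b.length ∧ ∀ q ∈ a.zip b, q.1 = q.2) := by
  induction a with
  | nil => intro b; cases b <;> simp
  | cons x xs ih =>
    intro b
    cases b with
    | nil => simp
    | cons y ys =>
      simp only [List.zip_cons_cons, List.mem_cons, List.length_cons]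
      constructor
      · intro h
        injection h with h1 h2
        subst h1; subst h2
        refine ⟨rfl, ?_⟩
        intro q hq
        rcases hq with hq | hq
        · subst hq; rfl
        · exact ((ih xs).1 rfl).2 q hq
      · rintro ⟨hl, hz⟩
        have hx : x = y := hz (x, y) (Or.inl rfl)
        have hxs : xs = ys := (ih ys).2 ⟨by omega, fun q hq => hz q (Or.inr hq)⟩
        rw [hx, hxs]

theorem takeWhile_ne_zero (cs : List Int) : ∀ c ∈ cs.takeWhile (fun c => !(c == 0)), c ≠ 0 := by
  intro c hc
  have := List.mem_takeWhile_imp hc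
  simpa using this

-- the bottom no-unknown branch of A is exactly list equality
theorem noUnknown_branch (ts sizes : List Int) :
    (if ts == sizes then true
     else if !(ts.length == sizes.length) then false
     else if (ts.zip sizes).any (fun p => !(p.1 == p.2)) then false
     else true) = (ts == sizes) := by
  by_cases h : ts = sizes
  · simp [h]
  · simp only [beq_iff_eq, h, if_false]
    by_cases hl : ts.length = sizes.length
    · simp only [hl, beq_self_eq_true, Bool.not_true, Bool.false_eq_true, if_false]
      have hany : (ts.zip sizes).any (fun p => !(p.1 == p.2)) = true := by
        by_contra hany
        have hall : ∀ q ∈ ts.zip sizes, q.1 = q.2 := by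
          intro q hq
          by_contra hne
          exact hany (List.any_eq_true.2 ⟨q, hq, by simpa using hne⟩)
        exact h ((eq_iff_len_zip ts sizes).2 ⟨hl, hall⟩)
      simp [hany, h]
    · simp [hl, h]

-- the has_unknown branch of A is exactly prefix equality
theorem unknown_branch (ts sizes : List Int) :
    (if ts == sizes then true
     else if ts.length > sizes.length then false
     else if (ts.zip (sizes.take ts.length)).any (fun p => !(p.1 == p.2)) then false
     else true) = (ts == sizes.take ts.length) := by
  by_cases h : ts = sizes
  · subst h; rw [List.take_length]; simp
  · simp only [beq_iff_eq, h, if_false]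
    by_cases hl : ts.length > sizes.length
    · have hne : ts ≠ sizes.take ts.length := by
        intro he
        have := congrArg List.length he
        simp only [List.length_take] at this
        omega
      simp [hl, hne]
    · simp only [hl, if_false]
      have hlen : (sizes.take ts.length).length = ts.length := by
        simp only [List.length_take]; omega
      by_cases hz : (ts.zip (sizes.take ts.length)).any (fun p => !(p.1 == p.2)) = true
      · have hne : ts ≠ sizes.take ts.length := by
          intro he
          obtain ⟨q, hq, hq2⟩ := List.any_eq_true.1 hz
          have : q.1 = q.2 := ((eq_iff_len_zip ts (sizes.take ts.length)).1 he).2 q hq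
          simp [this] at hq2
        simp [hz, hne]
      · have hall : ∀ q ∈ ts.zip (sizes.take ts.length), q.1 = q.2 := by
          intro q hq
          by_contra hne
          exact hz (List.any_eq_true.2 ⟨q, hq, by simpa using hne⟩)
        have heq : ts = sizes.take ts.length := (eq_iff_len_zip _ _).2 ⟨hlen.symm, hall⟩
        simp only [hz, Bool.false_eq_true, if_false]
        exact (beq_iff_eq.2 heq).symm

theorem zip_take_eq (ts : List Int) : ∀ sizes : List Int,
    ts.zip (sizes.take ts.length) = ts.zip sizes := by
  induction ts with
  | nil => intro sizes; simp
  | cons x xs ih => intro sizes; cases sizes <;> simp [ih]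

-- ===== VERDICT (by name: the statement is the Claim_ definition above) =====
theorem is_valid_condition_spec : Claim_equal_is_valid_condition := by
  intro conditions sizes _
  unfold Spec_is_valid_condition
  have hne := takeWhile_ne_zero conditions
  have hloop := avcLoop_eq conditions 0 []
  simp only [Nat.cast_zero] at hloop
  have hCG := charGroups_eq (conditions.takeWhile (fun c => !(c == 0))) 0 hne
  simp only [List.replicate_zero, List.nil_append] at hCG
  have hGL := getLast_hash (conditions.takeWhile (fun c => !(c == 0))) 0 hne
  simp only [List.replicate_zero, List.nil_append] at hGL
  simp only [is_valid_condition, is_valid_condition_alt, render_takeWhile, render_any, hloop]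
  set pre := conditions.takeWhile (fun c => !(c == 0)) with hpre
  by_cases hU : conditions.any (fun c => c == 0) = true
  · -- unknown present: A keeps only completed groups; B drops the last open run
    simp only [hU, Bool.not_true, Bool.false_and, Bool.false_eq_true, if_false, if_true]
    have hgroups :
        (if ((renderSprings pre).getLast? == some '#') = true
         then (charGroups (renderSprings pre)).dropLast
         else charGroups (renderSprings pre)) = grpsN pre 0 := by
      by_cases hp : 0 < pendN pre 0
      · rw [if_pos (hGL.2 hp), hCG, if_pos hp, List.dropLast_concat]
      · have hgl : ((renderSprings pre).getLast? == some '#') ≠ true := fun hc => hp (hGL.1 hc)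
        rw [if_neg hgl, hCG, if_neg hp, List.append_nil]
    have hslice : PySem.List.slice sizes none (some ((grpsN pre 0).length : Int))
        = sizes.take (grpsN pre 0).length := PySem.List.slice_to_natCast sizes _
    simp only [charGroups] at hgroups
    simp only [hgroups, hslice, List.nil_append]
    rw [zip_take_eq]
    rw [← zip_take_eq (grpsN pre 0) sizes]
    exact unknown_branch (grpsN pre 0) sizes
  · -- no unknown: both compare the full group list with sizes
    simp only [hU, Bool.not_false, Bool.true_and]
    have hts : (if (0:Int) < (pendN pre 0 : Int) then grpsN pre 0 ++ [((pendN pre 0 : Nat) : Int)] else grpsN pre 0)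
        = charGroups (renderSprings pre) := by
      rw [hCG]
      by_cases hp : 0 < pendN pre 0
      · rw [if_pos (by exact_mod_cast hp), if_pos hp]
      · rw [if_neg (by exact_mod_cast hp), if_neg hp, List.append_nil]
    by_cases hp : (0:Int) < (pendN pre 0 : Int)
    · rw [if_pos hp] at hts
      simp only [List.nil_append, hp, decide_true, if_true]
      simp only [charGroups] at hts
      rw [hts]
      exact noUnknown_branch _ sizes
    · rw [if_neg hp] at hts
      simp only [List.nil_append, hp, decide_false, if_false,
        Bool.false_eq_true]
      simp only [charGroups] at hts
      rw [hts]
      exact noUnknown_branch _ sizes
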